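-- pv_equiv track=rewrite | github.com/clayelmore/Kaprekar-60714 | scripts/verify_lemma_5_2.py | build_odd_ladder_rule
-- ===== SOURCE A (Python) =====
-- def build_odd_ladder_rule(d):
--     """Returns coefficient vector for odd-ladder rule at d (d >= 5, odd)."""
--     pi = [4, 1, 2, 3, 0]
--     sigma = [2, 0, 1, 4, 3]
--     cur_d = 5
--     while cur_d < d:
--         pi.extend([cur_d + 1, cur_d])
--         sigma.extend([cur_d, cur_d + 1])
--         cur_d += 2
--     return tuple(10 ** pi[i] - 10 ** sigma[i] for i in range(d))
-- ===== SOURCE B (Python) =====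
-- def build_odd_ladder_rule(d):
--     """Returns coefficient vector for odd-ladder rule at d (d >= 5, odd)."""
--     base = (10**4 - 10**2, 10**1 - 10**0, 10**2 - 10**1, 10**3 - 10**4, 10**0 - 10**3)
--     return tuple(
--         base[i] if i < 5
--         else (10**(i + 1) - 10**i if i % 2 == 1 else 10**(i - 1) - 10**i)
--         for i in range(d)
--     )
-- ===== Notes on version B (the rewrite author's own statement) =====
-- stated objective: simpler
-- what changed: Replaces the while-loop that incrementally extends the pi/sigma permutation arrays (then indexes them) with a single comprehension computing each coefficient directly from its index: a few hardcoded base values plus a parity closed form for the larger indices.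
import Mathlib
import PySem

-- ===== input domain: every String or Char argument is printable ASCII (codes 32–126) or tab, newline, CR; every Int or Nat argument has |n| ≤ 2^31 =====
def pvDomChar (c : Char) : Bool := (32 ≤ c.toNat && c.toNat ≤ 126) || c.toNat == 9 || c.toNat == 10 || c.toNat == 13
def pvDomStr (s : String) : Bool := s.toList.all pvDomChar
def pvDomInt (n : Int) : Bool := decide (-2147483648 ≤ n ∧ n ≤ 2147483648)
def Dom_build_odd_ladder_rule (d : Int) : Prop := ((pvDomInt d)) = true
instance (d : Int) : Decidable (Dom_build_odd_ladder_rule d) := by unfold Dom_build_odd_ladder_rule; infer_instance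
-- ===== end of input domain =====

-- B replaces A's while-loop construction of the pi/sigma permutation arrays by a direct
-- per-index closed form (5 base cases + a parity formula); objective: simpler.

-- ===== PORT A =====
-- the while loop: 'while cur_d < d: pi.extend([cur_d+1, cur_d]); sigma.extend([cur_d, cur_d+1]); cur_d += 2'
def pvBuildArrays (d cur_d : Int) (pi sigma : List Int) : List Int × List Int :=
  if cur_d < d then
    pvBuildArrays d (cur_d + 2) (pi ++ [cur_d + 1, cur_d]) (sigma ++ [cur_d, cur_d + 1])
  else (pi, sigma)
termination_by (d - cur_d).toNat
decreasing_by omega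

-- pi[i]/sigma[i] never raise here (the arrays always have length ≥ d ≥ i+1), so '.getD 0'
-- is exact; the exponents pi[i], sigma[i] are always ≥ 0, so '.toNat' is exact.
def build_odd_ladder_rule (d : Int) : List Int :=
  let pi0 : List Int := [4, 1, 2, 3, 0]
  let sigma0 : List Int := [2, 0, 1, 4, 3]
  let ps := pvBuildArrays d 5 pi0 sigma0
  (PySem.List.pyRange 0 d 1).map (fun i =>
    (10 : Int) ^ ((PySem.List.pyGet? ps.1 i).getD 0).toNat
      - (10 : Int) ^ ((PySem.List.pyGet? ps.2 i).getD 0).toNat)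

-- ===== PORT B =====
-- base[i] never raises here (i < 5 guard), so '.getD 0' is exact; exponents are ≥ 0.
def build_odd_ladder_rule_alt (d : Int) : List Int :=
  let base : List Int := [10 ^ 4 - 10 ^ 2, 10 ^ 1 - 10 ^ 0, 10 ^ 2 - 10 ^ 1,
                          10 ^ 3 - 10 ^ 4, 10 ^ 0 - 10 ^ 3]
  (PySem.List.pyRange 0 d 1).map (fun i =>
    if i < 5 then (PySem.List.pyGet? base i).getD 0
    else if i % 2 == 1 then (10 : Int) ^ (i + 1).toNat - (10 : Int) ^ i.toNat
    else (10 : Int) ^ (i - 1).toNat - (10 : Int) ^ i.toNat)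

-- ===== PRECONDITION & SPEC =====
def Spec_build_odd_ladder_rule (d : Int) (out : List Int) : Prop := out = build_odd_ladder_rule_alt d
instance (d : Int) (out : List Int) : Decidable (Spec_build_odd_ladder_rule d out) := by unfold Spec_build_odd_ladder_rule; infer_instance

-- ===== CLAIM (what is proved, stated in full; the proofs are below) =====
def Claim_equal_build_odd_ladder_rule : Prop := ∀ (d : Int), Dom_build_odd_ladder_rule d → Spec_build_odd_ladder_rule d (build_odd_ladder_rule d)

-- ===== LEMMAS AND PROOFS =====

-- the portion the while loop appends to pi (resp. sigma), as a standalone list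
def pvTailPi (d c : Int) : List Int :=
  if c < d then (c + 1) :: c :: pvTailPi d (c + 2) else []
termination_by (d - c).toNat
decreasing_by omega

def pvTailSigma (d c : Int) : List Int :=
  if c < d then c :: (c + 1) :: pvTailSigma d (c + 2) else []
termination_by (d - c).toNat
decreasing_by omega

theorem pvBuildArrays_eq (d c : Int) (pi sigma : List Int) :
    pvBuildArrays d c pi sigma = (pi ++ pvTailPi d c, sigma ++ pvTailSigma d c) := by
  fun_induction pvBuildArrays d c pi sigma with
  | case1 c pi sigma h ih =>
    rw [ih,
      show pvTailPi d c = (c + 1) :: c :: pvTailPi d (c + 2) from by rw [pvTailPi, if_pos h],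
      show pvTailSigma d c = c :: (c + 1) :: pvTailSigma d (c + 2) from by
        rw [pvTailSigma, if_pos h]]
    simp
  | case2 c pi sigma h =>
    rw [pvTailPi, pvTailSigma, if_neg h, if_neg h]
    simp

theorem pvTailPi_get (d : Int) : ∀ (j : Nat) (c : Int), (c : Int) + j < d →
    (pvTailPi d c)[j]? = some (if j % 2 = 0 then c + j + 1 else c + j - 1) := by
  intro j
  induction j using Nat.strong_induction_on with
  | _ j ih =>
    intro c h
    have hc : c < d := by omega
    rw [pvTailPi, if_pos hc]
    match j with
    | 0 => simp
    | 1 => simp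
    | k + 2 =>
      have : ((c + 1) :: c :: pvTailPi d (c + 2))[k + 2]? = (pvTailPi d (c + 2))[k]? := by
        simp
      rw [this, ih k (by omega) (c + 2) (by omega)]
      congr 1
      have hpar : (k + 2) % 2 = k % 2 := by omega
      rw [hpar]
      split_ifs <;> push_cast <;> ring

theorem pvTailSigma_get (d : Int) : ∀ (j : Nat) (c : Int), (c : Int) + j < d →
    (pvTailSigma d c)[j]? = some (c + j) := by
  intro j
  induction j using Nat.strong_induction_on with
  | _ j ih =>
    intro c h
    have hc : c < d := by omega
    rw [pvTailSigma, if_pos hc]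
    match j with
    | 0 => simp
    | 1 => simp
    | k + 2 =>
      have : (c :: (c + 1) :: pvTailSigma d (c + 2))[k + 2]? = (pvTailSigma d (c + 2))[k]? := by
        simp
      rw [this, ih k (by omega) (c + 2) (by omega)]
      congr 1
      omega

-- ===== VERDICT (by name: the statement is the Claim_ definition above) =====
theorem build_odd_ladder_rule_spec : Claim_equal_build_odd_ladder_rule := by
  intro d _
  show build_odd_ladder_rule d = build_odd_ladder_rule_alt d
  simp only [build_odd_ladder_rule, build_odd_ladder_rule_alt]
  rw [pvBuildArrays_eq]
  apply List.map_congr_left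
  intro i hi
  rw [PySem.List.mem_pyRange_one] at hi
  obtain ⟨hi0, hid⟩ := hi
  obtain ⟨k, rfl⟩ : ∃ k : Nat, i = (k : Int) := ⟨i.toNat, by omega⟩
  rw [PySem.List.pyGet?_natCast, PySem.List.pyGet?_natCast, PySem.List.pyGet?_natCast]
  by_cases hk5 : k < 5
  · rw [if_pos (by exact_mod_cast hk5)]
    interval_cases k <;> simp
  · rw [not_lt] at hk5
    rw [if_neg (by omega)]
    have hlen : ([(4:Int), 1, 2, 3, 0]).length = 5 := by simp
    have hkk : k = 5 + (k - 5) := by omega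
    have hpi : ([(4:Int), 1, 2, 3, 0] ++ pvTailPi d 5)[k]? = (pvTailPi d 5)[k - 5]? := by
      rw [List.getElem?_append_right (by simp; omega)]
      simp
    have hsig : ([(2:Int), 0, 1, 4, 3] ++ pvTailSigma d 5)[k]? = (pvTailSigma d 5)[k - 5]? := by
      rw [List.getElem?_append_right (by simp; omega)]
      simp
    rw [hpi, hsig, pvTailPi_get d (k - 5) 5 (by omega),
        pvTailSigma_get d (k - 5) 5 (by omega)]
    simp only [Option.getD_some]
    have hsigval : (5 : Int) + (k - 5 : Nat) = (k : Int) := by omega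
    rw [hsigval]
    by_cases hodd : (k : Int) % 2 == 1
    · rw [if_pos hodd]
      have : (k - 5) % 2 = 0 := by simp at hodd; omega
      rw [if_pos this]
    · rw [if_neg hodd]
      have : ¬ (k - 5) % 2 = 0 := by simp at hodd; omega
      rw [if_neg this]
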